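-- pv_equiv track=rewrite | github.com/OndrejMan/blocksci | blockscipy/blocksci/joinmarket_analysis.py | _compute_standard_denoms
-- ===== SOURCE A (Python) =====
-- from collections import Counter
-- from typing import Any, Dict, Optional, Tuple
--
-- def _compute_standard_denoms(coinjoins: Dict[str, Dict[str, Any]]) -> Dict[str, Dict[str, int]]:
--     """Compute repeated output denominations per transaction (anonset-like signal)."""
--     standard_denoms: Dict[str, Dict[str, int]] = {}
--     for txid in coinjoins:
--         values = [coinjoins[txid]["outputs"][idx]["value"] for idx in coinjoins[txid]["outputs"]]
--         counts = Counter(values)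
--         repeated = {str(value): int(cnt) for value, cnt in counts.items() if cnt > 1}
--         if repeated:
--             standard_denoms[txid] = repeated
--     return standard_denoms
-- ===== SOURCE B (Python) =====
-- def _compute_standard_denoms(coinjoins):
--     """Compute repeated output denominations per transaction (anonset-like signal)."""
--     standard_denoms = {}
--     for txid, txdata in coinjoins.items():
--         values = [out["value"] for out in txdata["outputs"].values()]
--         sv = sorted(values)
--         # run-length scan over the sorted values: value -> run length (only runs > 1)
--         multi = {}
--         i, n = 0, len(sv)
--         while i < n:
--             j = i + 1
--             while j < n and sv[j] == sv[i]:
--                 j += 1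
--             if j - i > 1:
--                 multi[sv[i]] = j - i
--             i = j
--         # rebuild first-appearance order from the original values list
--         repeated = {}
--         seen = set()
--         for v in values:
--             if v in multi and v not in seen:
--                 seen.add(v)
--                 repeated[str(v)] = multi[v]
--         if repeated:
--             standard_denoms[txid] = repeated
--     return standard_denoms
-- ===== Notes on version B (the rewrite author's own statement) =====
-- stated objective: alternative
-- what changed: Replaces Counter-based hash counting per transaction with a sort-then-run-length scan (manual groupby over sorted values) plus a first-appearance-order rebuild pass, so repeated denominations are found by scanning consecutive equal runs instead of hashing counts.
import Mathlib
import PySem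

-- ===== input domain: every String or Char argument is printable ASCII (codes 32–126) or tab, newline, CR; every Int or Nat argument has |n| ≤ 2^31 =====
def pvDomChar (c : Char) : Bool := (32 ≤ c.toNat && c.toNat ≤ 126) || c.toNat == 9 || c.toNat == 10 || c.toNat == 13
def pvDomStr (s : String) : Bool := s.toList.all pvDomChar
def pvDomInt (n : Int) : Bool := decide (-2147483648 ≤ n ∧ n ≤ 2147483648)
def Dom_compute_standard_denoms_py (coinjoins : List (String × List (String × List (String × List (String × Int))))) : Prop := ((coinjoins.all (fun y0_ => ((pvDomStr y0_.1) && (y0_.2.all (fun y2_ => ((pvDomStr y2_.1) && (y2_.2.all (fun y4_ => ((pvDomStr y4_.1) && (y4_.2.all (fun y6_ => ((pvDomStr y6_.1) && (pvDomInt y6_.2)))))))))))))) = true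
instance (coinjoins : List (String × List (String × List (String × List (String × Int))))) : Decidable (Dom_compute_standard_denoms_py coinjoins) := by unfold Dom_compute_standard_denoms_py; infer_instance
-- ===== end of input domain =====

-- B replaces the per-transaction Counter by a sort-then-run-length scan plus a first-appearance
-- rebuild pass; an alternative algorithm of similar cost, proved to return the same dict (same order).

-- ===== PORT A =====
-- Dicts are materialised with PySem.Dict.ofList (Python dict(pairs): last duplicate wins, first
-- position kept); 'standard_denoms[txid] = repeated' appends because the iterated txids are the
-- (unique) keys of the coinjoins dict.
def compute_standard_denoms_py (coinjoins : List (String × List (String × List (String × List (String × Int))))) : List (String × List (String × Int)) :=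
  (PySem.Dict.ofList coinjoins).items.foldl (fun res p =>
    let txd := PySem.Dict.ofList p.2
    let outs := PySem.Dict.ofList (txd.getD "outputs" [])
    -- [coinjoins[txid]["outputs"][idx]["value"] for idx in coinjoins[txid]["outputs"]]
    let values := outs.keys.map (fun idx => (PySem.Dict.ofList (outs.getD idx [])).getD "value" 0)
    let counts := PySem.Dict.counter values
    -- {str(value): int(cnt) for value, cnt in counts.items() if cnt > 1}
    let repeated := counts.items.foldl (fun (d : PySem.Dict String Int) kv =>
      if 1 < kv.2 then d.insert (PySem.Int.toStr kv.1) kv.2 else d) PySem.Dict.empty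
    if repeated.items.isEmpty then res else res ++ [(p.1, repeated.items)]) []

-- ===== PORT B =====
-- the two nested while loops of Source B, as recursion on the remaining (sorted) list: one run at a time
def pvRunLens : List Int → PySem.Dict Int Int → PySem.Dict Int Int
  | [], acc => acc
  | v :: rest, acc =>
    let run := rest.takeWhile (fun x => x == v)
    let n : Int := (run.length : Int) + 1
    pvRunLens (rest.dropWhile (fun x => x == v)) (if 1 < n then acc.insert v n else acc)
  termination_by l _ => l.length
  decreasing_by
    simp only [List.length_cons]
    exact Nat.lt_succ_of_le (List.length_dropWhile_le _ _)

def compute_standard_denoms_py_alt (coinjoins : List (String × List (String × List (String × List (String × Int))))) : List (String × List (String × Int)) :=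
  (PySem.Dict.ofList coinjoins).items.foldl (fun res p =>
    let txd := PySem.Dict.ofList p.2
    let outs := PySem.Dict.ofList (txd.getD "outputs" [])
    -- [out["value"] for out in txdata["outputs"].values()]
    let values := outs.values.map (fun ov => (PySem.Dict.ofList ov).getD "value" 0)
    let sv := PySem.List.sorted values (fun x => x) false
    let multi := pvRunLens sv PySem.Dict.empty
    -- for v in values: if v in multi and v not in seen: seen.add(v); repeated[str(v)] = multi[v]
    let repeated := (values.foldl
      (fun (sd : PySem.Set Int × PySem.Dict String Int) v =>
        if multi.contains v && !(PySem.Set.contains sd.1 v) then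
          (PySem.Set.add sd.1 v, sd.2.insert (PySem.Int.toStr v) (multi.getD v 0))
        else sd)
      (PySem.Set.empty, PySem.Dict.empty)).2
    if repeated.items.isEmpty then res else res ++ [(p.1, repeated.items)]) []

-- ===== PRECONDITION & SPEC =====
-- Pre_ excludes exactly the inputs on which the Python raises KeyError: a transaction dict without
-- the "outputs" key, or an output dict without the "value" key.
def Pre_compute_standard_denoms_py (coinjoins : List (String × List (String × List (String × List (String × Int))))) : Prop :=
  ∀ p ∈ (PySem.Dict.ofList coinjoins).items,
    (PySem.Dict.ofList p.2).contains "outputs" = true ∧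
    ∀ q ∈ (PySem.Dict.ofList ((PySem.Dict.ofList p.2).getD "outputs" [])).items,
      (PySem.Dict.ofList q.2).contains "value" = true
instance (coinjoins : List (String × List (String × List (String × List (String × Int))))) : Decidable (Pre_compute_standard_denoms_py coinjoins) := by unfold Pre_compute_standard_denoms_py; infer_instance

def pvWitness_compute_standard_denoms_py : (List (String × List (String × List (String × List (String × Int))))) :=
  [("tx1", [("outputs", [("0", [("value", 5)]), ("1", [("value", 5)]), ("2", [("value", 3)])])])]

def Spec_compute_standard_denoms_py (coinjoins : List (String × List (String × List (String × List (String × Int))))) (out : List (String × List (String × Int))) : Prop := out = compute_standard_denoms_py_alt coinjoins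
instance (coinjoins : List (String × List (String × List (String × List (String × Int))))) (out : List (String × List (String × Int))) : Decidable (Spec_compute_standard_denoms_py coinjoins out) := by unfold Spec_compute_standard_denoms_py; infer_instance

-- ===== CLAIM (what is proved, stated in full; the proofs are below) =====
def Claim_equal_compute_standard_denoms_py : Prop := ∀ (coinjoins : List (String × List (String × List (String × List (String × Int))))), Dom_compute_standard_denoms_py coinjoins → Pre_compute_standard_denoms_py coinjoins → Spec_compute_standard_denoms_py coinjoins (compute_standard_denoms_py coinjoins)

-- ===== LEMMAS AND PROOFS =====

theorem pv_foldl_filter_if {α β : Type} (p : α → Prop) [DecidablePred p] (f : β → α → β) :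
    ∀ (l : List α) (b : β),
      l.foldl (fun b x => if p x then f b x else b) b = (l.filter (fun x => decide (p x))).foldl f b := by
  intro l
  induction l with
  | nil => intro b; rfl
  | cons x xs ih =>
    intro b
    by_cases h : p x <;> simp [h, ih]

theorem pv_runLens_spec (l : List Int) (hs : l.Pairwise (· ≤ ·)) (acc : PySem.Dict Int Int) (v : Int) :
    (pvRunLens l acc).contains v = (acc.contains v || decide (1 < l.count v)) ∧
    (pvRunLens l acc).getD v 0 = if 1 < l.count v then (l.count v : Int) else acc.getD v 0 := by
  fun_induction pvRunLens l acc with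
  | case1 acc => simp
  | case2 v0 rest acc run n ih =>
    have hrest : rest = run ++ rest.dropWhile (fun x => x == v0) :=
      (List.takeWhile_append_dropWhile (p := fun x => x == v0) (l := rest)).symm
    have hrp : rest.Pairwise (· ≤ ·) := hs.of_cons
    have hdp : (rest.dropWhile (fun x => x == v0)).Pairwise (· ≤ ·) :=
      List.Pairwise.sublist (List.dropWhile_sublist _) hrp
    have hrun : ∀ x ∈ run, x = v0 := by
      intro x hx
      have := List.mem_takeWhile_imp hx
      simpa using this.symm
    have hv0le : ∀ x ∈ rest, v0 ≤ x := (List.pairwise_cons.mp hs).1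
    have hv0drop : v0 ∉ rest.dropWhile (fun x => x == v0) := by
      cases hd : rest.dropWhile (fun x => x == v0) with
      | nil => simp
      | cons w ws =>
        have hw : (w == v0) = false := by
          have h0 : 0 < (rest.dropWhile (fun x => x == v0)).length := by simp [hd]
          have := List.dropWhile_get_zero_not (p := fun x => x == v0) rest h0
          simpa [hd] using this
        have hwne : w ≠ v0 := by simpa using hw
        intro hmem
        rcases List.mem_cons.mp hmem with h | h
        · exact hwne h.symm
        · have hsubl : List.Sublist (rest.dropWhile (fun x => x == v0)) rest := List.dropWhile_sublist _
          have hwrest : w ∈ rest := List.Sublist.mem (by simp [hd]) hsubl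
          have h1 : v0 ≤ w := hv0le w hwrest
          have hdp' : (w :: ws).Pairwise (· ≤ ·) := hd ▸ hdp
          have h2 : w ≤ v0 := (List.pairwise_cons.mp hdp').1 v0 h
          exact hwne (le_antisymm h2 h1)
    have hcr : run.count v0 = run.length := by
      rw [List.count_eq_length]
      intro b hb; exact (hrun b hb).symm
    have hcd0 : (rest.dropWhile (fun x => x == v0)).count v0 = 0 :=
      List.count_eq_zero.mpr hv0drop
    have hc0 : (v0 :: rest).count v0 = run.length + 1 := by
      rw [List.count_cons_self]
      conv_lhs => rw [hrest]
      rw [List.count_append, hcr, hcd0]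
    have hcne : ∀ w : Int, w ≠ v0 → (v0 :: rest).count w = (rest.dropWhile (fun x => x == v0)).count w := by
      intro w hwne
      have h1 : run.count w = 0 := List.count_eq_zero.mpr (fun hm => hwne (hrun w hm))
      conv_lhs => rw [hrest]
      simp [List.count_cons, List.count_append, h1]
      exact fun e => hwne e.symm
    specialize ih hdp
    simp only [dite_eq_ite] at ih
    by_cases hv : v = v0
    · subst hv
      rw [hc0]
      by_cases hn : 1 < n
      · have hrl : 0 < run.length := by simp only [n] at hn; omega
        have hd1 : ¬ (1 < (rest.dropWhile (fun x => x == v)).count v) := by omega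
        have h11 : 1 < run.length + 1 := by omega
        constructor
        · rw [ih.1, if_pos hn, hcd0]
          simp [PySem.Dict.contains_insert_self, h11]
        · rw [ih.2, if_pos hn, if_neg hd1, PySem.Dict.getD_insert_self, if_pos h11]
          simp only [n]
          push_cast
          ring
      · have hrl : run.length = 0 := by simp only [n] at hn; omega
        constructor
        · rw [ih.1, if_neg hn, hcd0]
          simp [hrl]
        · rw [ih.2, if_neg hn, hcd0]
          simp [hrl]
    · have hc := hcne v hv
      have hbv : (v == v0) = false := by simp [hv]
      rw [hc]
      constructor
      · rw [ih.1]
        by_cases hn : 1 < n <;>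
          simp [hn, PySem.Dict.contains_insert, hbv]
      · rw [ih.2]
        by_cases hn : 1 < n <;> by_cases hcv : 1 < (rest.dropWhile (fun x => x == v0)).count v <;>
          simp [hn, hcv, PySem.Dict.getD_insert_of_ne _ _ _ hv]

theorem pv_bfold (q : Int → Bool) (c : Int → Int) :
    ∀ (l u : List Int),
      l.foldl
        (fun (sd : PySem.Set Int × PySem.Dict String Int) v =>
          if q v && !(PySem.Set.contains sd.1 v) then
            (PySem.Set.add sd.1 v, sd.2.insert (PySem.Int.toStr v) (c v))
          else sd)
        ((PySem.Set.ofList u).filter q,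
         ((PySem.Set.ofList u).filter q).foldl
           (fun (d : PySem.Dict String Int) k => d.insert (PySem.Int.toStr k) (c k)) PySem.Dict.empty)
      = ((PySem.Set.ofList (u ++ l)).filter q,
         ((PySem.Set.ofList (u ++ l)).filter q).foldl
           (fun (d : PySem.Dict String Int) k => d.insert (PySem.Int.toStr k) (c k)) PySem.Dict.empty) := by
  intro l
  induction l with
  | nil => intro u; simp
  | cons v l ih =>
    intro u
    rw [List.foldl_cons]
    have hgoal :
        (PySem.Set.ofList (u ++ [v])).filter q =
          (if q v && !(PySem.Set.contains ((PySem.Set.ofList u).filter q) v) then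
            PySem.Set.add ((PySem.Set.ofList u).filter q) v else (PySem.Set.ofList u).filter q) := by
      rw [PySem.Set.ofList_append_singleton]
      by_cases hm : v ∈ PySem.Set.ofList u
      · rw [PySem.Set.add_of_mem hm]
        by_cases hq : q v
        · have hmem : v ∈ (PySem.Set.ofList u).filter q := List.mem_filter.mpr ⟨hm, hq⟩
          rw [(PySem.Set.contains_iff _ _).mpr hmem]
          simp
        · simp [hq]
      · rw [PySem.Set.add_of_not_mem hm, List.filter_append]
        by_cases hq : q v
        · have hnmem : v ∉ (PySem.Set.ofList u).filter q := fun h => hm (List.mem_filter.mp h).1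
          have hcon : PySem.Set.contains ((PySem.Set.ofList u).filter q) v = false := by
            rcases Bool.eq_false_or_eq_true (PySem.Set.contains ((PySem.Set.ofList u).filter q) v) with h | h
            · exact absurd ((PySem.Set.contains_iff _ _).mp h) hnmem
            · exact h
          rw [hcon, PySem.Set.add_of_not_mem hnmem]
          simp [hq]
        · simp [hq]
    have hstep :
        (if q v && !(PySem.Set.contains ((PySem.Set.ofList u).filter q) v) then
            (PySem.Set.add ((PySem.Set.ofList u).filter q) v,
             (((PySem.Set.ofList u).filter q).foldl
               (fun (d : PySem.Dict String Int) k => d.insert (PySem.Int.toStr k) (c k)) PySem.Dict.empty).insert (PySem.Int.toStr v) (c v))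
          else
            ((PySem.Set.ofList u).filter q,
             ((PySem.Set.ofList u).filter q).foldl
               (fun (d : PySem.Dict String Int) k => d.insert (PySem.Int.toStr k) (c k)) PySem.Dict.empty))
        = ((PySem.Set.ofList (u ++ [v])).filter q,
           ((PySem.Set.ofList (u ++ [v])).filter q).foldl
             (fun (d : PySem.Dict String Int) k => d.insert (PySem.Int.toStr k) (c k)) PySem.Dict.empty) := by
      by_cases hcond : (q v && !(PySem.Set.contains ((PySem.Set.ofList u).filter q) v)) = true
      · rw [if_pos hcond]
        rw [if_pos hcond] at hgoal
        have hnm : v ∉ (PySem.Set.ofList u).filter q := by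
          intro h
          have hc := (PySem.Set.contains_iff _ _).mpr h
          rw [hc] at hcond
          simp at hcond
        have h2 : (PySem.Set.ofList (u ++ [v])).filter q = (PySem.Set.ofList u).filter q ++ [v] := by
          rw [hgoal, PySem.Set.add_of_not_mem hnm]
        rw [h2, PySem.Set.add_of_not_mem hnm, List.foldl_append]
        rfl
      · rw [if_neg hcond]
        rw [if_neg hcond] at hgoal
        rw [hgoal]
    dsimp only
    rw [hstep]
    have h3 := ih (u ++ [v])
    rw [List.append_assoc] at h3
    simpa using h3

theorem pv_inner (values : List Int) :
    (PySem.Dict.counter values).items.foldl (fun (d : PySem.Dict String Int) kv =>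
        if 1 < kv.2 then d.insert (PySem.Int.toStr kv.1) kv.2 else d) PySem.Dict.empty
    = (values.foldl
        (fun (sd : PySem.Set Int × PySem.Dict String Int) v =>
          if (pvRunLens (PySem.List.sorted values (fun x => x) false) PySem.Dict.empty).contains v
              && !(PySem.Set.contains sd.1 v) then
            (PySem.Set.add sd.1 v,
             sd.2.insert (PySem.Int.toStr v)
               ((pvRunLens (PySem.List.sorted values (fun x => x) false) PySem.Dict.empty).getD v 0))
          else sd)
        (PySem.Set.empty, PySem.Dict.empty)).2 := by
  have hperm : (PySem.List.sorted values (fun x => x) false).Perm values :=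
    PySem.List.sorted_perm values (fun x => x) false
  have hsp : (PySem.List.sorted values (fun x => x) false).Pairwise (· ≤ ·) := by
    have := PySem.List.sorted_pairwise values (fun x => x)
    simpa using this
  have hq : ∀ v, (pvRunLens (PySem.List.sorted values (fun x => x) false) PySem.Dict.empty).contains v
      = decide (1 < values.count v) := by
    intro v
    rw [(pv_runLens_spec _ hsp _ v).1, hperm.count_eq v]
    simp
  have hc : ∀ v, 1 < values.count v →
      (pvRunLens (PySem.List.sorted values (fun x => x) false) PySem.Dict.empty).getD v 0
      = (values.count v : Int) := by
    intro v hv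
    rw [(pv_runLens_spec _ hsp _ v).2, hperm.count_eq v, if_pos hv]
  -- B side
  have hB := pv_bfold
    (fun v => (pvRunLens (PySem.List.sorted values (fun x => x) false) PySem.Dict.empty).contains v)
    (fun v => (pvRunLens (PySem.List.sorted values (fun x => x) false) PySem.Dict.empty).getD v 0)
    values []
  have hB2 := congrArg Prod.snd hB
  rw [show ((PySem.Set.ofList ([] : List Int)).filter
        (fun v => (pvRunLens (PySem.List.sorted values (fun x => x) false) PySem.Dict.empty).contains v),
      ((PySem.Set.ofList ([] : List Int)).filter
        (fun v => (pvRunLens (PySem.List.sorted values (fun x => x) false) PySem.Dict.empty).contains v)).foldl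
        (fun (d : PySem.Dict String Int) k => d.insert (PySem.Int.toStr k)
          ((pvRunLens (PySem.List.sorted values (fun x => x) false) PySem.Dict.empty).getD k 0)) PySem.Dict.empty)
      = ((PySem.Set.empty : PySem.Set Int), (PySem.Dict.empty : PySem.Dict String Int)) from rfl] at hB2
  rw [hB2]
  -- A side
  rw [pv_foldl_filter_if (fun kv : Int × Int => 1 < kv.2)
    (fun (d : PySem.Dict String Int) kv => d.insert (PySem.Int.toStr kv.1) kv.2)]
  rw [PySem.Dict.items_counter, List.filter_map, List.foldl_map]
  dsimp only
  -- same filtered list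
  have hfil : (PySem.Set.ofList values).filter
        ((fun kv : Int × Int => decide (1 < kv.2)) ∘ (fun k => (k, (values.count k : Int))))
      = (PySem.Set.ofList values).filter
        (fun v => (pvRunLens (PySem.List.sorted values (fun x => x) false) PySem.Dict.empty).contains v) := by
    apply List.filter_congr
    intro k _
    rw [hq k]
    simp only [Function.comp]
    rw [decide_eq_decide]
    omega
  rw [hfil]
  apply PySem.List.foldl_congr_mem
  intro acc k hk
  have hqk := (List.mem_filter.mp hk).2
  rw [hq k] at hqk
  have hck : 1 < values.count k := of_decide_eq_true hqk
  rw [hc k hck]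

-- ===== main proof =====

-- ===== VERDICT (by name: the statement is the Claim_ definition above) =====
theorem compute_standard_denoms_py_spec : Claim_equal_compute_standard_denoms_py := by
  intro coinjoins _ _
  unfold Spec_compute_standard_denoms_py
  unfold compute_standard_denoms_py compute_standard_denoms_py_alt
  apply PySem.List.foldl_congr_mem
  intro res p hp
  dsimp only
  have hnd : (PySem.Dict.ofList ((PySem.Dict.ofList p.2).getD "outputs" [])).keys.Nodup :=
    PySem.Dict.nodup_keys_ofList _
  have hvals :
      (PySem.Dict.ofList ((PySem.Dict.ofList p.2).getD "outputs" [])).keys.map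
        (fun idx => (PySem.Dict.ofList ((PySem.Dict.ofList ((PySem.Dict.ofList p.2).getD "outputs" [])).getD idx [])).getD "value" 0)
      = (PySem.Dict.ofList ((PySem.Dict.ofList p.2).getD "outputs" [])).values.map
        (fun ov => (PySem.Dict.ofList ov).getD "value" 0) := by
    rw [PySem.Dict.values_eq_map_keys _ hnd []]
    rw [List.map_map]
    rfl
  rw [← hvals]
  rw [pv_inner]
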